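-- pv_equiv track=rewrite | github.com/KRakeesh04/Sem01_labs | pp1_exercises/pp1_palindrome_prime&square.py | palindrome_prime
-- ===== SOURCE A (Python) =====
-- def palindrome_prime(num_range) :
--     prime_add = 0
--     #1 2 3 5 7 11
--     for j in range(num_range[0], num_range[1]) :
--         if j == 1 :
--             continue
--         elif str(j) == str(j)[::-1] :
--             for k in range(2,j) :
--                 if j%k != 0 :
--                     continue
--                 else :
--                     j = 0
--             prime_add += j
--         else :
--             continue
--     return prime_add
-- ===== SOURCE B (Python) =====
-- def _is_prime(n):
--     if n < 2:
--         return False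
--     d = 2
--     while d * d <= n:
--         if n % d == 0:
--             return False
--         d += 1
--     return True
--
--
-- def palindrome_prime(num_range):
--     return sum(j for j in range(num_range[0], num_range[1])
--                if str(j) == str(j)[::-1] and _is_prime(j))
-- ===== Notes on version B (the rewrite author's own statement) =====
-- stated objective: alternative
-- what changed: Replaces A's full trial division over range(2,j) with its mutate-j-to-0 trick by a sqrt(j)-bounded early-exit primality helper and a filtered sum over the range.
import Mathlib
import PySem

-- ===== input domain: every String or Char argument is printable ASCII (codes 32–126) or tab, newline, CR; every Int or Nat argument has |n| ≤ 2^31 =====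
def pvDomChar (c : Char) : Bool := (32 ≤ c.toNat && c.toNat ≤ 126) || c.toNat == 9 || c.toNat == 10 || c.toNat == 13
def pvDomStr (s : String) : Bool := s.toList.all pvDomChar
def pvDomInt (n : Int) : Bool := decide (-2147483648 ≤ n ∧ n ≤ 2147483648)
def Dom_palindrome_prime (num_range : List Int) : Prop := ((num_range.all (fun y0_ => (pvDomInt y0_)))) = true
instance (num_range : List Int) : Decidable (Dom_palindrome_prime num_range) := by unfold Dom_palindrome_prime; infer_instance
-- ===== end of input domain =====

-- B replaces A's full trial division over range(2, j) (with its mutate-j-to-0 trick) by a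
-- sqrt-bounded early-exit primality helper and a filtered sum over the range.

-- ===== PORT A =====
def palindrome_prime (num_range : List Int) : Int :=
  match PySem.List.pyGet? num_range 0, PySem.List.pyGet? num_range 1 with
  | some lo, some hi =>
      (PySem.List.pyRange lo hi 1).foldl (fun prime_add j =>
        if j = 1 then prime_add
        else if PySem.List.slice? (PySem.Int.toChars j) none none (-1)
               = some (PySem.Int.toChars j) then
          prime_add + (PySem.List.pyRange 2 j 1).foldl
            (fun jv k => if PySem.Int.mod jv k ≠ 0 then jv else 0) j
        else prime_add) 0
  | _, _ => 0

-- ===== PORT B =====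
-- while d * d <= n: … d += 1   (terminates: d ≤ d*d ≤ n bounds d)
def pvIsPrimeLoop (n d : Int) : Bool :=
  if _h : d * d ≤ n then
    if PySem.Int.mod n d = 0 then false else pvIsPrimeLoop n (d + 1)
  else true
termination_by (n + 1 - d).toNat
decreasing_by
  have hd : d ≤ d * d := by nlinarith [sq_nonneg d, sq_nonneg (d - 1)]
  omega

def pvIsPrime (n : Int) : Bool := if n < 2 then false else pvIsPrimeLoop n 2

def palindrome_prime_alt (num_range : List Int) : Int :=
  match PySem.List.pyGet? num_range 0 with
  | none => 0
  | some lo =>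
    match PySem.List.pyGet? num_range 1 with
    | none => 0
    | some hi =>
      ((PySem.List.pyRange lo hi 1).filter (fun j =>
          decide (PySem.List.slice? (PySem.Int.toChars j) none none (-1)
                    = some (PySem.Int.toChars j))
          && pvIsPrime j)).sum

-- ===== PRECONDITION & SPEC =====
-- Lists with fewer than two elements make Python A raise IndexError (B raises there too).
def Pre_palindrome_prime (num_range : List Int) : Prop := 2 ≤ num_range.length
instance (num_range : List Int) : Decidable (Pre_palindrome_prime num_range) := by
  unfold Pre_palindrome_prime; infer_instance

def pvWitness_palindrome_prime : List Int := [2, 12]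

def Spec_palindrome_prime (num_range : List Int) (out : Int) : Prop := out = palindrome_prime_alt num_range
instance (num_range : List Int) (out : Int) : Decidable (Spec_palindrome_prime num_range out) := by unfold Spec_palindrome_prime; infer_instance

-- ===== CLAIM (what is proved, stated in full; the proofs are below) =====
def Claim_equal_palindrome_prime : Prop := ∀ (num_range : List Int), Dom_palindrome_prime num_range → Pre_palindrome_prime num_range → Spec_palindrome_prime num_range (palindrome_prime num_range)

-- ===== LEMMAS AND PROOFS =====

theorem pv_digitChar_ne_dash (m : Nat) : Nat.digitChar m ≠ '-' := by
  rcases m with _|_|_|_|_|_|_|_|_|_|_|_|_|_|_|_|n <;> simp [Nat.digitChar]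

theorem pv_mem_toDigitsCore (b f : Nat) :
    ∀ (n : Nat) (l : List Char) (c : Char), c ∈ Nat.toDigitsCore b f n l →
      c ∈ l ∨ ∃ m, c = Nat.digitChar m := by
  induction f with
  | zero => intro n l c h; exact Or.inl h
  | succ f ih =>
    intro n l c h
    simp only [Nat.toDigitsCore] at h
    split_ifs at h with h1
    · rcases List.mem_cons.mp h with h2 | h2
      · exact Or.inr ⟨n % b, h2⟩
      · exact Or.inl h2
    · rcases ih (n / b) (Nat.digitChar (n % b) :: l) c h with h2 | h2
      · rcases List.mem_cons.mp h2 with h3 | h3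
        · exact Or.inr ⟨n % b, h3⟩
        · exact Or.inl h3
      · exact Or.inr h2

theorem pv_toDigitsCore_ne_nil (b : Nat) :
    ∀ (f n : Nat) (l : List Char), l ≠ [] → Nat.toDigitsCore b f n l ≠ [] := by
  intro f
  induction f with
  | zero => intro n l hl; simpa [Nat.toDigitsCore] using hl
  | succ f ih =>
    intro n l hl
    simp only [Nat.toDigitsCore]
    split_ifs
    · simp
    · exact ih (n / b) (Nat.digitChar (n % b) :: l) (by simp)

theorem pv_toDigits_ne_nil (b n : Nat) : Nat.toDigits b n ≠ [] := by
  unfold Nat.toDigits Nat.toDigitsCore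
  dsimp only
  split_ifs
  · simp
  · exact pv_toDigitsCore_ne_nil b n (n / b) [Nat.digitChar (n % b)] (by simp)

theorem pv_neg_not_pal (j : Int) (hj : j < 0) :
    ¬ (PySem.Int.toChars j).reverse = PySem.Int.toChars j := by
  intro h
  have hchars : PySem.Int.toChars j = '-' :: Nat.toDigits 10 j.natAbs := by
    simp [PySem.Int.toChars, hj]
  set ds := Nat.toDigits 10 j.natAbs with hds
  have hne : ds ≠ [] := pv_toDigits_ne_nil 10 j.natAbs
  rw [hchars] at h
  rw [List.reverse_cons] at h
  obtain ⟨c, hc⟩ : ∃ c, ds.getLast? = some c :=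
    Option.isSome_iff_exists.mp (List.getLast?_isSome.mpr hne)
  have hcds : c ∈ ds := List.mem_of_getLast? hc
  have hcdash : c = '-' := by
    have h' := congrArg List.head? h
    rw [List.head?_append, List.head?_reverse, hc] at h'
    simpa using h'
  rcases pv_mem_toDigitsCore 10 _ _ _ _ hcds with h2 | ⟨m, hm⟩
  · simp at h2
  · exact pv_digitChar_ne_dash m (hcdash ▸ hm.symm)

-- the inner-loop state, once 0, stays 0 (0 % k == 0 for every k)
theorem pv_fold_zero (l : List Int) :
    l.foldl (fun jv k => if PySem.Int.mod jv k ≠ 0 then jv else 0) 0 = 0 := by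
  induction l with
  | nil => rfl
  | cons k t ih =>
    have h0 : PySem.Int.mod 0 k = 0 := (PySem.Int.mod_eq_zero_iff_dvd 0 k).mpr (dvd_zero k)
    simpa [h0] using ih

-- A's inner loop returns j when no k in the list divides j, else 0
theorem pv_fold_char (l : List Int) (j : Int) :
    l.foldl (fun jv k => if PySem.Int.mod jv k ≠ 0 then jv else 0) j
      = if (∀ k ∈ l, PySem.Int.mod j k ≠ 0) then j else 0 := by
  induction l with
  | nil => simp
  | cons k t ih =>
    by_cases hk : PySem.Int.mod j k ≠ 0
    · simp only [List.foldl_cons, if_pos hk, ih]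
      by_cases ht : ∀ k ∈ t, PySem.Int.mod j k ≠ 0
      · rw [if_pos ht, if_pos (by simpa [hk] using ht)]
      · rw [if_neg ht, if_neg (by intro h; exact ht (fun x hx => h x (List.mem_cons_of_mem k hx)))]
    · rw [ne_eq, not_not] at hk
      simp only [List.foldl_cons, hk, ne_eq, not_true_eq_false, if_false, pv_fold_zero]
      rw [if_neg]
      intro h
      exact (h k List.mem_cons_self) hk

theorem pv_loop_char (fuel : Nat) :
    ∀ (n d : Int), (n + 1 - d).toNat ≤ fuel → 2 ≤ n → 1 ≤ d →
      (pvIsPrimeLoop n d = true ↔ ∀ m : Int, d ≤ m → m * m ≤ n → ¬ m ∣ n) := by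
  induction fuel with
  | zero =>
    intro n d hf hn hd
    have hdn : n < d := by omega
    have hsq : ¬ d * d ≤ n := by nlinarith
    rw [pvIsPrimeLoop, dif_neg hsq]
    simp only [true_iff]
    intro m hm hmm _
    nlinarith
  | succ fuel ih =>
    intro n d hf hn hd
    by_cases hsq : d * d ≤ n
    · have hdn : d ≤ n := by nlinarith
      rw [pvIsPrimeLoop, dif_pos hsq]
      by_cases hmod : PySem.Int.mod n d = 0
      · rw [if_pos hmod]
        have hdvd : d ∣ n := (PySem.Int.mod_eq_zero_iff_dvd n d).mp hmod
        simp only [Bool.false_eq_true, false_iff]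
        intro hall
        exact hall d le_rfl hsq hdvd
      · rw [if_neg hmod]
        have hndvd : ¬ d ∣ n := fun hdvd =>
          hmod ((PySem.Int.mod_eq_zero_iff_dvd n d).mpr hdvd)
        rw [ih n (d + 1) (by omega) hn (by omega)]
        constructor
        · intro hall m hm hmm hdvd
          rcases eq_or_lt_of_le hm with rfl | hlt
          · exact hndvd hdvd
          · exact hall m (by omega) hmm hdvd
        · intro hall m hm hmm hdvd
          exact hall m (by omega) hmm hdvd
    · rw [pvIsPrimeLoop, dif_neg hsq]
      simp only [true_iff]
      intro m hm hmm _
      nlinarith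

theorem pv_sqrt_iff_full (n : Int) (hn : 2 ≤ n) :
    (∀ m : Int, 2 ≤ m → m * m ≤ n → ¬ m ∣ n) ↔ (∀ k : Int, 2 ≤ k → k < n → ¬ k ∣ n) := by
  constructor
  · intro h k hk2 hkn hdvd
    obtain ⟨q, hq⟩ := hdvd
    have hq2 : 2 ≤ q := by nlinarith
    by_cases hkk : k * k ≤ n
    · exact h k hk2 hkk ⟨q, hq⟩
    · have hqk : q ≤ k := by nlinarith
      exact h q hq2 (by nlinarith) ⟨k, by rw [hq]; ring⟩
  · intro h m hm2 hmm hdvd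
    have hmn : m < n := by nlinarith
    exact h m hm2 hmn hdvd

-- for j ≥ 2: B's sqrt-bounded test agrees with A's full trial division
theorem pv_prime_eq (j : Int) (hj : 2 ≤ j) :
    (pvIsPrime j = true) ↔ ∀ k ∈ PySem.List.pyRange 2 j 1, PySem.Int.mod j k ≠ 0 := by
  unfold pvIsPrime
  rw [if_neg (by omega)]
  rw [pv_loop_char (j + 1 - 2).toNat j 2 le_rfl hj (by omega)]
  rw [pv_sqrt_iff_full j hj]
  constructor
  · intro h k hk
    rw [PySem.List.mem_pyRange_one] at hk
    intro hmod
    exact h k hk.1 hk.2 ((PySem.Int.mod_eq_zero_iff_dvd j k).mp hmod)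
  · intro h k hk2 hkj hdvd
    exact h k (PySem.List.mem_pyRange_one.mpr ⟨hk2, hkj⟩)
      ((PySem.Int.mod_eq_zero_iff_dvd j k).mpr hdvd)

-- the per-element contributions of the two ports agree
theorem pv_point (acc j : Int) :
    (if j = 1 then acc
     else if PySem.List.slice? (PySem.Int.toChars j) none none (-1)
            = some (PySem.Int.toChars j) then
       acc + (PySem.List.pyRange 2 j 1).foldl
         (fun jv k => if PySem.Int.mod jv k ≠ 0 then jv else 0) j
     else acc)
    = acc + (if (decide (PySem.List.slice? (PySem.Int.toChars j) none none (-1)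
                    = some (PySem.Int.toChars j))
                 && pvIsPrime j) = true then j else 0) := by
  by_cases h1 : j = 1
  · subst h1
    have : pvIsPrime 1 = false := rfl
    simp [this]
  rw [if_neg h1]
  by_cases hpal : PySem.List.slice? (PySem.Int.toChars j) none none (-1)
      = some (PySem.Int.toChars j)
  · have hrev : (PySem.Int.toChars j).reverse = PySem.Int.toChars j := by
      have := PySem.List.slice?_none_none_neg_one (xs := PySem.Int.toChars j)
      rw [this] at hpal
      exact Option.some.inj hpal
    rw [if_pos hpal, pv_fold_char]
    by_cases h2 : 2 ≤ j
    · rw [decide_eq_true hpal, Bool.true_and]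
      by_cases hp : pvIsPrime j = true
      · rw [if_pos ((pv_prime_eq j h2).mp hp), if_pos hp]
      · rw [if_neg (fun hall => hp ((pv_prime_eq j h2).mpr hall)),
          if_neg (by simpa using hp)]
    · have hj0 : j = 0 ∨ j < 0 := by omega
      rcases hj0 with rfl | hneg
      · have hr : PySem.List.pyRange 2 0 1 = [] := PySem.List.pyRange_one_eq_nil (by omega)
        have : pvIsPrime 0 = false := rfl
        simp [hr, this]
      · exact absurd hrev (pv_neg_not_pal j hneg)
  · rw [if_neg hpal, decide_eq_false hpal, Bool.false_and]
    simp

theorem pv_fold_eq_sum (l : List Int) :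
    ∀ (init : Int),
      l.foldl (fun prime_add j =>
        if j = 1 then prime_add
        else if PySem.List.slice? (PySem.Int.toChars j) none none (-1)
               = some (PySem.Int.toChars j) then
          prime_add + (PySem.List.pyRange 2 j 1).foldl
            (fun jv k => if PySem.Int.mod jv k ≠ 0 then jv else 0) j
        else prime_add) init
      = init + ((l.filter (fun j =>
          decide (PySem.List.slice? (PySem.Int.toChars j) none none (-1)
                    = some (PySem.Int.toChars j))
          && pvIsPrime j)).sum) := by
  induction l with
  | nil => intro init; simp
  | cons j t ih =>
    intro init
    rw [List.foldl_cons, pv_point init j, ih, List.filter_cons]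
    cases hp : (decide (PySem.List.slice? (PySem.Int.toChars j) none none (-1)
                    = some (PySem.Int.toChars j)) && pvIsPrime j) with
    | true => simp only [reduceIte, List.sum_cons]; ring
    | false => simp only [Bool.false_eq_true, reduceIte]; ring

-- ===== VERDICT (by name: the statement is the Claim_ definition above) =====
theorem palindrome_prime_spec : Claim_equal_palindrome_prime := by
  intro num_range _hdom hpre
  obtain ⟨a, b, t, rfl⟩ : ∃ a b t, num_range = a :: b :: t := by
    match num_range, hpre with
    | a :: b :: t, _ => exact ⟨a, b, t, rfl⟩
  unfold Spec_palindrome_prime palindrome_prime palindrome_prime_alt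
  have h1 : PySem.List.pyGet? (a :: b :: t) 1 = some b := by
    have := PySem.List.pyGet?_of_nonneg (xs := a :: b :: t) (i := 1) (by norm_num)
    rw [this]
    rfl
  rw [PySem.List.pyGet?_zero_cons a (b :: t), h1]
  dsimp only
  rw [pv_fold_eq_sum (PySem.List.pyRange a b 1) 0, zero_add]
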